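-- pv_equiv track=rewrite | github.com/AI-Guru/garland-composer | app.py | shortened_sequence
-- ===== SOURCE A (Python) =====
-- def shortened_sequence(token_sequence):
--
--     # Find the position of the next to last NEXT token.
--     next_tokens = token_sequence.split()
--     next_positions = [i for i, x in enumerate(next_tokens) if x == "NEXT" or x == "GARLAND_END"]
--     if len(next_positions) <= 1:
--         token_sequence = "GARLAND_START"
--     else:
--         next_position = next_positions[-2]
--         token_sequence = " ".join(next_tokens[:next_position + 1])
--     return token_sequence
-- ===== SOURCE B (Python) =====
-- def shortened_sequence(token_sequence):
--     # Scan from the right, stop early at the second-to-last NEXT/GARLAND_END token.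
--     tokens = token_sequence.split()
--     count = 0
--     for i in range(len(tokens) - 1, -1, -1):
--         if tokens[i] == "NEXT" or tokens[i] == "GARLAND_END":
--             count += 1
--             if count == 2:
--                 return " ".join(tokens[:i + 1])
--     return "GARLAND_START"
-- ===== Notes on version B (the rewrite author's own statement) =====
-- stated objective: alternative
-- what changed: Replaces A's materialized list of all NEXT/GARLAND_END positions (built by a full enumerate pass, then indexed with [-2]) by a single right-to-left scan with a match counter that stops as soon as the second match from the end is found.
import Mathlib
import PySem

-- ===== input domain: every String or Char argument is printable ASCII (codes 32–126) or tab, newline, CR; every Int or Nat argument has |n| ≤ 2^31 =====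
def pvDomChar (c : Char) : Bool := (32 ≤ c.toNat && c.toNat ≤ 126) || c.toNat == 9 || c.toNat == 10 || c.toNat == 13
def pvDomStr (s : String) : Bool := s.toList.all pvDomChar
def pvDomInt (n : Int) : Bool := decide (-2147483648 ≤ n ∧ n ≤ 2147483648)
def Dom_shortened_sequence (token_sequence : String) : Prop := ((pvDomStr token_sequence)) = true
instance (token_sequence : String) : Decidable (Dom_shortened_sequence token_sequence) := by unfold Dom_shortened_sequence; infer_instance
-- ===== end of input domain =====

-- B replaces A's full positions list + [-2] indexing by a right-to-left scan that
-- stops at the second match from the end (alternative decomposition, same cost class).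

-- ===== PORT A =====
def shortened_sequence (token_sequence : String) : String :=
  let next_tokens := PySem.Str.split₀ token_sequence
  let next_positions := (PySem.List.enumerate next_tokens 0).filterMap
    (fun p => if p.2 == "NEXT" || p.2 == "GARLAND_END" then some p.1 else none)
  if next_positions.length ≤ 1 then "GARLAND_START"
  else
    let next_position := (PySem.List.pyGet? next_positions (-2)).getD 0
    PySem.Str.join " " (PySem.List.slice next_tokens none (some (next_position + 1)))

-- ===== PORT B =====
-- the reversed for-loop with its counter and early return, as structural recursion
def bscan : List String → Int → Nat → Option Int
  | [], _, _ => none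
  | t :: rest, idx, c =>
    if t == "NEXT" || t == "GARLAND_END" then
      if c + 1 == 2 then some idx else bscan rest (idx - 1) (c + 1)
    else bscan rest (idx - 1) c

def shortened_sequence_alt (token_sequence : String) : String :=
  let tokens := PySem.Str.split₀ token_sequence
  match bscan tokens.reverse ((tokens.length : Int) - 1) 0 with
  | some i => PySem.Str.join " " (PySem.List.slice tokens none (some (i + 1)))
  | none => "GARLAND_START"

-- ===== PRECONDITION & SPEC =====
def Spec_shortened_sequence (token_sequence : String) (out : String) : Prop := out = shortened_sequence_alt token_sequence
instance (token_sequence : String) (out : String) : Decidable (Spec_shortened_sequence token_sequence out) := by unfold Spec_shortened_sequence; infer_instance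

-- ===== CLAIM (what is proved, stated in full; the proofs are below) =====
def Claim_equal_shortened_sequence : Prop := ∀ (token_sequence : String), Dom_shortened_sequence token_sequence → Spec_shortened_sequence token_sequence (shortened_sequence token_sequence)

-- ===== LEMMAS AND PROOFS =====

def pvPositions (ts : List String) : List Int :=
  (PySem.List.enumerate ts 0).filterMap
    (fun p => if p.2 == "NEXT" || p.2 == "GARLAND_END" then some p.1 else none)

lemma pvPositions_append (ts : List String) (t : String) :
    pvPositions (ts ++ [t]) =
      pvPositions ts ++ (if t == "NEXT" || t == "GARLAND_END" then [(ts.length : Int)] else []) := by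
  unfold pvPositions
  rw [PySem.List.enumerate_append, List.filterMap_append]
  have hm' : (t = "NEXT" ∨ t = "GARLAND_END") ↔ (t == "NEXT" || t == "GARLAND_END") = true := by simp
  by_cases hm : (t == "NEXT" || t == "GARLAND_END") = true <;>
    simp [PySem.List.enumerate_cons, PySem.List.enumerate_nil, hm', hm]

lemma bscan_eq (ts : List String) : ∀ c : Nat, c ≤ 1 →
    bscan ts.reverse ((ts.length : Int) - 1) c = (pvPositions ts).reverse[1 - c]? := by
  induction ts using List.reverseRecOn with
  | nil =>
    intro c _
    simp [bscan, pvPositions, PySem.List.enumerate_nil]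
  | append_singleton ts t ih =>
    intro c hc
    have hrev : (ts ++ [t]).reverse = t :: ts.reverse := by simp
    have hidx : ((ts ++ [t]).length : Int) - 1 = (ts.length : Int) := by
      simp
    rw [hrev, hidx, pvPositions_append]
    by_cases hm : (t == "NEXT" || t == "GARLAND_END") = true
    · simp only [bscan, hm, if_true]
      interval_cases c
      · rw [if_neg (by decide)]
        rw [ih 1 (by omega)]
        simp
      · rw [if_pos (by decide)]
        simp
    · simp only [bscan, hm, if_false, Bool.false_eq_true]
      rw [ih c hc]
      simp

lemma pvMain (ts : List String) :
    (if (pvPositions ts).length ≤ 1 then "GARLAND_START"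
     else PySem.Str.join " " (PySem.List.slice ts none
       (some ((PySem.List.pyGet? (pvPositions ts) (-2)).getD 0 + 1)))) =
    (match bscan ts.reverse ((ts.length : Int) - 1) 0 with
     | some i => PySem.Str.join " " (PySem.List.slice ts none (some (i + 1)))
     | none => "GARLAND_START") := by
  have hb := bscan_eq ts 0 (by omega)
  set P := pvPositions ts with hP
  by_cases h : P.length ≤ 1
  · have hn : P.reverse[1]? = none := by
      rw [List.getElem?_eq_none]
      simpa using h
    rw [hb, hn, if_pos h]
  · push Not at h
    have hlt : 1 < P.reverse.length := by simpa using h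
    have hrev : P.reverse[1]? = P[P.length - 1 - 1]? := List.getElem?_reverse (by simpa using h)
    have hidx : P.length - 1 - 1 = P.length - 2 := by omega
    rw [hidx] at hrev
    have hsome : P[P.length - 2]? = some (P[P.length - 2]'(by omega)) :=
      List.getElem?_eq_getElem (by omega)
    have hpy : PySem.List.pyGet? P (-2) = some (P[P.length - 2]'(by omega)) := by
      rw [PySem.List.pyGet?_neg_ofNat P 2 (by omega) (by omega)]
      exact hsome
    rw [hb, hrev, hsome, if_neg (by omega), hpy]
    simp

-- ===== VERDICT (by name: the statement is the Claim_ definition above) =====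
theorem shortened_sequence_spec : Claim_equal_shortened_sequence := by
  intro s _
  exact pvMain (PySem.Str.split₀ s)
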